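-- pv_equiv track=rewrite | github.com/anananmd/shoe_store_practice_1 | app/import_excel.py | parse_order_articles
-- ===== SOURCE A (Python) =====
-- def parse_order_articles(raw_value: str) -> list[tuple[str, int]]:
--     parts = [part.strip() for part in str(raw_value).split(",") if part.strip()]
--     result = []
--
--     index = 0
--     while index < len(parts):
--         article = parts[index]
--         quantity = 1
--
--         if index + 1 < len(parts):
--             next_part = parts[index + 1]
--             try:
--                 quantity = int(next_part)
--                 index += 2
--             except ValueError:
--                 index += 1
--         else:
--             index += 1
--
--         result.append((article, quantity))
--
--     return result
-- ===== SOURCE B (Python) =====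
-- def parse_order_articles(raw_value: str) -> list[tuple[str, int]]:
--     tokens = [p.strip() for p in str(raw_value).split(",") if p.strip()]
--     result = []
--     pending = None
--     for tok in tokens:
--         if pending is None:
--             pending = tok
--         else:
--             try:
--                 quantity = int(tok)
--                 result.append((pending, quantity))
--                 pending = None
--             except ValueError:
--                 result.append((pending, 1))
--                 pending = tok
--     if pending is not None:
--         result.append((pending, 1))
--     return result
-- ===== Notes on version B (the rewrite author's own statement) =====
-- stated objective: simpler
-- what changed: Replaces A's while-loop with manual index arithmetic (index += 1 or 2, lookahead at the next token) by a single for-loop over the tokens that carries the currently unmatched article and flushes it after the loop.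
import Mathlib
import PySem

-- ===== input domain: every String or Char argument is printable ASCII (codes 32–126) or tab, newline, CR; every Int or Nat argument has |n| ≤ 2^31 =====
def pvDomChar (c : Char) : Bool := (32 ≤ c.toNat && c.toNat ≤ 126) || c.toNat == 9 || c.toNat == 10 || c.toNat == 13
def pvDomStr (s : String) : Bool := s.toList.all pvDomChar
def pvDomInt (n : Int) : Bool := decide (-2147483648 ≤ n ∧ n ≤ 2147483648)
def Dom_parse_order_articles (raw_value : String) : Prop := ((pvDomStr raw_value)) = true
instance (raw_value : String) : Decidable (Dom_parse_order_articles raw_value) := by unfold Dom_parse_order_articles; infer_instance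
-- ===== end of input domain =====

-- B replaces A's manual index arithmetic by one forward pass carrying a 'pending article'; objective: simpler decomposition, same cost.

-- ===== PORT A =====
-- tokens shared by both ports: stripped, nonempty comma-separated pieces
def pvTokens (raw_value : String) : List String :=
  (((PySem.Str.split? raw_value ",").getD []).map PySem.Str.strip).filter (· ≠ "")
  -- split? is `some` since "," ≠ "", so getD [] is exact

-- A's while-loop over the index
def pvLoopA (parts : List String) (index : Nat) : List (String × Int) :=
  if h : index < parts.length then
    let article := parts[index]
    if h2 : index + 1 < parts.length then
      let next_part := parts[index + 1]
      match PySem.Int.ofStr? next_part with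
      | some q => (article, q) :: pvLoopA parts (index + 2)
      | none => (article, 1) :: pvLoopA parts (index + 1)
    else (article, 1) :: pvLoopA parts (index + 1)
  else []
termination_by parts.length - index

def parse_order_articles (raw_value : String) : List (String × Int) :=
  pvLoopA (pvTokens raw_value) 0

-- ===== PORT B =====
-- one step of B's for-loop: state = (result so far, pending article)
def pvStepB (st : List (String × Int) × Option String) (tok : String) :
    List (String × Int) × Option String :=
  match st.2 with
  | none => (st.1, some tok)
  | some a =>
    match PySem.Int.ofStr? tok with
    | some q => (st.1 ++ [(a, q)], none)
    | none => (st.1 ++ [(a, 1)], some tok)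

def parse_order_articles_alt (raw_value : String) : List (String × Int) :=
  let st := (pvTokens raw_value).foldl pvStepB ([], none)
  match st.2 with
  | some a => st.1 ++ [(a, 1)]
  | none => st.1

-- ===== PRECONDITION & SPEC =====
def Spec_parse_order_articles (raw_value : String) (out : List (String × Int)) : Prop := out = parse_order_articles_alt raw_value
instance (raw_value : String) (out : List (String × Int)) : Decidable (Spec_parse_order_articles raw_value out) := by unfold Spec_parse_order_articles; infer_instance

-- ===== CLAIM (what is proved, stated in full; the proofs are below) =====
def Claim_equal_parse_order_articles : Prop := ∀ (raw_value : String), Dom_parse_order_articles raw_value → Spec_parse_order_articles raw_value (parse_order_articles raw_value)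

-- ===== LEMMAS AND PROOFS =====

-- B's loop, written as direct recursion on the remaining tokens with the pending article
def pvRunB (ts : List String) (pend : Option String) : List (String × Int) :=
  match ts, pend with
  | [], none => []
  | [], some a => [(a, 1)]
  | t :: ts, none => pvRunB ts (some t)
  | t :: ts, some a =>
    match PySem.Int.ofStr? t with
    | some q => (a, q) :: pvRunB ts none
    | none => (a, 1) :: pvRunB ts (some t)

-- the foldl-with-accumulator form of B equals the direct recursion
theorem pvFoldB_eq (ts : List String) (acc : List (String × Int)) (pend : Option String) :
    (match (ts.foldl pvStepB (acc, pend)).2 with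
     | some a => (ts.foldl pvStepB (acc, pend)).1 ++ [(a, 1)]
     | none => (ts.foldl pvStepB (acc, pend)).1) = acc ++ pvRunB ts pend := by
  induction ts generalizing acc pend with
  | nil => cases pend <;> simp [pvRunB]
  | cons t ts ih =>
    cases pend with
    | none => simpa [pvStepB, pvRunB] using ih acc (some t)
    | some a =>
      cases h : PySem.Int.ofStr? t with
      | some q =>
        have H := ih (acc ++ [(a, q)]) none
        rw [List.append_assoc, List.singleton_append] at H
        simpa [pvStepB, pvRunB, h] using H
      | none =>
        have H := ih (acc ++ [(a, 1)]) (some t)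
        rw [List.append_assoc, List.singleton_append] at H
        simpa [pvStepB, pvRunB, h] using H

-- A's index loop equals B's recursion on the dropped suffix
theorem pvLoopA_eq (parts : List String) (index : Nat) :
    pvLoopA parts index = pvRunB (parts.drop index) none := by
  induction hn : parts.length - index using Nat.strong_induction_on generalizing index with
  | _ n ih =>
  by_cases h : index < parts.length
  · have hdrop : parts.drop index = parts[index] :: parts.drop (index + 1) :=
      List.drop_eq_getElem_cons h
    by_cases h2 : index + 1 < parts.length
    · have hdrop2 : parts.drop (index + 1) = parts[index + 1] :: parts.drop (index + 2) :=
        List.drop_eq_getElem_cons h2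
      rw [pvLoopA, dif_pos h, dif_pos h2, hdrop, hdrop2, pvRunB, pvRunB]
      cases hq : PySem.Int.ofStr? parts[index + 1] with
      | some q =>
        have IH2 := ih (parts.length - (index + 2)) (by omega) (index + 2) rfl
        simp only [hq, IH2]
      | none =>
        have IH1 := ih (parts.length - (index + 1)) (by omega) (index + 1) rfl
        rw [hdrop2, pvRunB] at IH1
        simp only [hq, IH1]
    · have hdrop2 : parts.drop (index + 1) = [] :=
        List.drop_eq_nil_of_le (by omega)
      have IH1 := ih (parts.length - (index + 1)) (by omega) (index + 1) rfl
      rw [hdrop2] at IH1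
      rw [pvLoopA, dif_pos h, dif_neg h2, hdrop, hdrop2, pvRunB, pvRunB, IH1, pvRunB]
  · have hdrop : parts.drop index = [] := List.drop_eq_nil_of_le (by omega)
    rw [pvLoopA, dif_neg h, hdrop, pvRunB]

-- ===== VERDICT (by name: the statement is the Claim_ definition above) =====
theorem parse_order_articles_spec : Claim_equal_parse_order_articles := by
  intro raw _
  unfold Spec_parse_order_articles parse_order_articles parse_order_articles_alt
  rw [pvLoopA_eq]
  simpa using (pvFoldB_eq (pvTokens raw) [] none).symm
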